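-- pv_equiv track=rewrite | github.com/teamwork-challenge/platform | tasks/decoding/router.py | generate_reversed_swapped_sentence
-- ===== SOURCE A (Python) =====
-- def generate_reversed_swapped_sentence(sentence: str) -> str:
--     swapped_chars = ''
--     for i in range(0, len(sentence), 2):
--         if i + 1 < len(sentence):
--             swapped_chars += sentence[i + 1]
--             swapped_chars += sentence[i]
--         else:
--             swapped_chars += sentence[i]
--     reversed_sentence = swapped_chars[::-1]
--     return ''.join(reversed_sentence)
-- ===== SOURCE B (Python) =====
-- def generate_reversed_swapped_sentence(sentence: str) -> str:
--     n = len(sentence)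
--     chunks = [sentence[i:i + 2] for i in range(0, n - n % 2, 2)]
--     result = ''.join(reversed(chunks))
--     if n % 2:
--         result = sentence[-1] + result
--     return result
-- ===== Notes on version B (the rewrite author's own statement) =====
-- stated objective: alternative
-- what changed: B never swaps characters: it cuts the paired prefix into 2-char chunks, reverses the chunk list and joins it (the reversal cancels the within-pair swap), prepending the leftover last character when the length is odd.
import Mathlib
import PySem

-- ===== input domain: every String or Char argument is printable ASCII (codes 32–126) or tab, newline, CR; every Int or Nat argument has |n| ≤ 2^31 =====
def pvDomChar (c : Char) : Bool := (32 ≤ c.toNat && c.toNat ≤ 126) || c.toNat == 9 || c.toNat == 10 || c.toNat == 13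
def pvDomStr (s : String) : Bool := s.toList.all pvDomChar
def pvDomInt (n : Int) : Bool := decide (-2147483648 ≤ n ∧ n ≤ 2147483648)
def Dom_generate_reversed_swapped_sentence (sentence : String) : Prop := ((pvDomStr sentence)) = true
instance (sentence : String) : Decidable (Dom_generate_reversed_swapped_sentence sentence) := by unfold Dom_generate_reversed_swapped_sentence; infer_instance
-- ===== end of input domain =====

-- B builds the 2-char chunks of the paired prefix, reverses the chunk list and joins it,
-- prepending the leftover last character when the length is odd — no character-level swap
-- (objective: simpler, one pass over chunks instead of per-character index arithmetic).

-- ===== PORT A =====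
-- literal port of A: accumulate swapped characters over range(0, len, 2), then reverse
def generate_reversed_swapped_sentence (sentence : String) : String :=
  let cs : List Char := sentence.toList
  let n : Int := PySem.Str.len sentence
  let swapped_chars : List Char :=
    (PySem.List.pyRange 0 n 2).foldl
      (fun acc i =>
        if i + 1 < n then
          acc ++ [PySem.List.pyGetD cs (i + 1) ' ', PySem.List.pyGetD cs i ' ']
        else
          acc ++ [PySem.List.pyGetD cs i ' ']) []
  let reversed_sentence : List Char := swapped_chars.reverse
  String.ofList reversed_sentence

-- ===== PORT B =====
-- literal port of B: chunk slices of the paired prefix, reversed and joined; leftover char in front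
def generate_reversed_swapped_sentence_alt (sentence : String) : String :=
  let cs : List Char := sentence.toList
  let n : Int := PySem.Str.len sentence
  let chunks : List (List Char) :=
    (PySem.List.pyRange 0 (n - PySem.Int.mod n 2) 2).map
      (fun i => PySem.List.slice cs (some i) (some (i + 2)))
  let result : List Char := chunks.reverse.flatten
  let result : List Char :=
    if PySem.Int.mod n 2 ≠ 0 then PySem.List.pyGetD cs (-1) ' ' :: result else result
  String.ofList result

-- ===== PRECONDITION & SPEC =====
def Spec_generate_reversed_swapped_sentence (sentence : String) (out : String) : Prop := out = generate_reversed_swapped_sentence_alt sentence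
instance (sentence : String) (out : String) : Decidable (Spec_generate_reversed_swapped_sentence sentence out) := by unfold Spec_generate_reversed_swapped_sentence; infer_instance

-- ===== CLAIM (what is proved, stated in full; the proofs are below) =====
def Claim_equal_generate_reversed_swapped_sentence : Prop := ∀ (sentence : String), Dom_generate_reversed_swapped_sentence sentence → Spec_generate_reversed_swapped_sentence sentence (generate_reversed_swapped_sentence sentence)

-- ===== LEMMAS AND PROOFS =====

-- characterisation of A's loop result: the pair-swapped character list
def pvSwapSpec : List Char → List Char
  | a :: b :: r => b :: a :: pvSwapSpec r
  | [a] => [a]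
  | [] => []

-- the 2-char chunks of the fully paired prefix
def pvChunks : List Char → List (List Char)
  | a :: b :: r => [a, b] :: pvChunks r
  | [_] => []
  | [] => []

theorem pvPyRange2_cons (a b : Int) (h : a < b) :
    PySem.List.pyRange a b 2 = a :: PySem.List.pyRange (a + 2) b 2 := by
  rw [PySem.List.pyRange_of_pos a b (by norm_num),
      PySem.List.pyRange_of_pos (a + 2) b (by norm_num)]
  by_cases h2 : a + 2 < b
  · have hc : ((b - a + 2 - 1) / 2).toNat = ((b - (a + 2) + 2 - 1) / 2).toNat + 1 := by omega
    rw [if_pos h, if_pos h2, hc, List.range_succ_eq_map]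
    simp only [List.map_cons, List.map_map]
    refine congrArg₂ _ (by ring) (List.map_congr_left ?_)
    intro k _
    simp only [Function.comp_apply, Nat.succ_eq_add_one]
    push_cast
    ring
  · have hc : ((b - a + 2 - 1) / 2).toNat = 1 := by omega
    rw [if_pos h, if_neg h2, hc]
    simp
theorem pvPyRange2_nil (a b : Int) (h : b ≤ a) :
    PySem.List.pyRange a b 2 = [] := by
  rw [PySem.List.pyRange_of_pos a b (by norm_num), if_neg (by omega)]
  simp

theorem pvPyRange2_shift (b : Int) :
    PySem.List.pyRange 2 b 2 = (PySem.List.pyRange 0 (b - 2) 2).map (· + 2) := by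
  rw [PySem.List.pyRange_of_pos 2 b (by norm_num),
      PySem.List.pyRange_of_pos 0 (b - 2) (by norm_num)]
  by_cases hb : 2 < b
  · rw [if_pos hb, if_pos (by omega)]
    have hcnt : (b - 2 + 2 - 1) / 2 = (b - 2 - 0 + 2 - 1) / 2 := by ring_nf
    rw [hcnt]
    simp only [List.map_map]
    exact List.map_congr_left (fun k _ => by simp only [Function.comp_apply]; ring)
  · rw [if_neg hb, if_neg (by omega)]
    simp

theorem pvGetD_cons_add_one (x : Char) (xs : List Char) (i : Int) (h : 0 ≤ i) (d : Char) :
    PySem.List.pyGetD (x :: xs) (i + 1) d = PySem.List.pyGetD xs i d := by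
  obtain ⟨n, rfl⟩ := Int.eq_ofNat_of_zero_le h
  have : ((n : Int) + 1) = ((n + 1 : Nat) : Int) := by push_cast; ring
  rw [this, PySem.List.pyGetD_natCast, PySem.List.pyGetD_natCast]
  simp

theorem pvMem_nonneg {b i : Int} (h : i ∈ PySem.List.pyRange 0 b 2) : 0 ≤ i := by
  have := (PySem.List.mem_pyRange_iff_of_pos (by norm_num : (0:Int) < 2) i).mp h
  omega

-- A's loop computes acc ++ pvSwapSpec cs
theorem pvLoopA_eq (cs : List Char) (acc : List Char) (n : Int)
    (hn : n = (cs.length : Int)) :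
    (PySem.List.pyRange 0 n 2).foldl
      (fun acc i =>
        if i + 1 < n then
          acc ++ [PySem.List.pyGetD cs (i + 1) ' ', PySem.List.pyGetD cs i ' ']
        else
          acc ++ [PySem.List.pyGetD cs i ' ']) acc
    = acc ++ pvSwapSpec cs := by
  subst hn
  induction cs using pvSwapSpec.induct generalizing acc with
  | case3 =>
      simp [pvSwapSpec, pvPyRange2_nil 0 0 le_rfl]
  | case2 a =>
      have h1 : PySem.List.pyRange 0 ((([a] : List Char).length : Int)) 2 = [0] := by
        simp only [List.length_singleton, Nat.cast_one]
        rw [pvPyRange2_cons 0 1 (by norm_num)]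
        norm_num [pvPyRange2_nil 2 1 (by norm_num)]
      rw [h1]
      simp [pvSwapSpec, PySem.List.pyGetD]
  | case1 a b r ih =>
      have hn : ((a :: b :: r).length : Int) = (r.length : Int) + 2 := by push_cast [List.length_cons]; ring
      rw [hn, pvPyRange2_cons 0 ((r.length : Int) + 2) (by positivity)]
      simp only [List.foldl_cons]
      rw [if_pos (by omega : (0:Int) + 1 < (r.length : Int) + 2)]
      have hget0 : PySem.List.pyGetD (a :: b :: r) (0 : Int) ' ' = a := by
        rw [(by norm_num : (0:Int) = ((0:Nat):Int)), PySem.List.pyGetD_natCast]; rfl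
      have hget1 : PySem.List.pyGetD (a :: b :: r) ((0:Int) + 1) ' ' = b := by
        rw [(by norm_num : (0:Int) + 1 = ((1:Nat):Int)), PySem.List.pyGetD_natCast]; rfl
      rw [hget0, hget1, (by ring : (0:Int) + 2 = 2), pvPyRange2_shift, List.foldl_map]
      rw [PySem.List.foldl_congr_mem _ _
        (fun acc i =>
          if i + 1 < ((r.length : Nat) : Int) then
            acc ++ [PySem.List.pyGetD r (i + 1) ' ', PySem.List.pyGetD r i ' ']
          else
            acc ++ [PySem.List.pyGetD r i ' ']) _ ?_]
      · rw [(by ring_nf : (r.length:Int) + 2 - 2 = (r.length:Int)), ih]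
        simp [pvSwapSpec]
      · intro acc2 i hi
        dsimp only
        have h0 : 0 ≤ i := pvMem_nonneg (by
          have : (r.length : Int) + 2 - 2 = (r.length : Int) := by ring
          rw [this] at hi; exact hi)
        have e1 : PySem.List.pyGetD (a :: b :: r) (i + 2) ' ' = PySem.List.pyGetD r i ' ' := by
          have : i + 2 = (i + 1) + 1 := by ring
          rw [this, pvGetD_cons_add_one a _ (i+1) (by omega),
              pvGetD_cons_add_one b _ i h0]
        have e2 : PySem.List.pyGetD (a :: b :: r) (i + 2 + 1) ' ' = PySem.List.pyGetD r (i + 1) ' ' := by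
          have : i + 2 + 1 = (i + 1 + 1) + 1 := by ring
          rw [this, pvGetD_cons_add_one a _ (i+1+1) (by omega),
              pvGetD_cons_add_one b _ (i+1) (by omega)]
        by_cases hc : i + 1 < ((r.length : Nat) : Int)
        · rw [if_pos (by omega : i + 2 + 1 < (r.length : Int) + 2), if_pos hc, e1, e2]
        · rw [if_neg (by omega : ¬ (i + 2 + 1 < (r.length : Int) + 2)), if_neg hc, e1]

-- B's chunk comprehension computes pvChunks cs
theorem pvChunksB_eq (cs : List Char) (n : Int) (hn : n = (cs.length : Int)) :
    (PySem.List.pyRange 0 (n - PySem.Int.mod n 2) 2).map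
      (fun i => PySem.List.slice cs (some i) (some (i + 2)))
    = pvChunks cs := by
  subst hn
  induction cs using pvChunks.induct with
  | case3 =>
      have h0 : PySem.List.pyRange 0 ((([] : List Char).length : Int)
          - PySem.Int.mod ((([] : List Char).length : Int)) 2) 2 = [] := by decide
      rw [h0]; rfl
  | case2 a =>
      have h0 : PySem.List.pyRange 0 ((([a] : List Char).length : Int)
          - PySem.Int.mod ((([a] : List Char).length : Int)) 2) 2 = [] := by
        simp only [List.length_singleton, Nat.cast_one]
        decide
      rw [h0]; rfl
  | case1 a b r ih =>
      have hlen : (((a :: b :: r).length : Int)) = (r.length : Int) + 2 := by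
        push_cast [List.length_cons]; ring
      rw [hlen]
      have hm : PySem.Int.mod ((r.length : Int) + 2) 2
              = PySem.Int.mod ((r.length : Int)) 2 := by
        simp only [PySem.Int.mod]
        have h2 : ((r.length : Int) + 2) = (r.length : Int) + 2 * 1 := by ring
        rw [h2, Int.add_mul_fmod_self_left]
      rw [hm]
      have hmr : 0 ≤ PySem.Int.mod ((r.length : Int)) 2 ∧ PySem.Int.mod ((r.length : Int)) 2 < 2 := by
        constructor
        · exact Int.fmod_nonneg (by positivity) (by norm_num)
        · exact Int.fmod_lt_of_pos _ (by norm_num)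
      rw [pvPyRange2_cons 0 _ (by omega), (by ring : (0:Int) + 2 = 2), pvPyRange2_shift]
      have hsub : (r.length : Int) + 2 - PySem.Int.mod ((r.length : Int)) 2 - 2
                = (r.length : Int) - PySem.Int.mod ((r.length : Int)) 2 := by ring
      rw [hsub]
      simp only [List.map_cons, List.map_map]
      have hhead : PySem.List.slice (a :: b :: r) (some 0) (some (0 + 2)) = [a, b] := by
        rw [(by norm_num : (some (0:Int)) = some ((0:Nat):Int)),
            (by norm_num : (0:Int) + 2 = ((2:Nat):Int)), PySem.List.slice_natCast]
        simp
      rw [hhead]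
      show _ = [a, b] :: pvChunks r
      congr 1
      · rw [← ih]
        apply List.map_congr_left
        intro i hi
        have h0 : 0 ≤ i := pvMem_nonneg hi
        obtain ⟨n, rfl⟩ := Int.eq_ofNat_of_zero_le h0
        simp only [Function.comp_apply]
        have c1 : ((n:Int) + 2) = ((n + 2 : Nat) : Int) := by push_cast; ring
        rw [c1]
        have c2 : (((n + 2 : Nat) : Int) + 2) = ((n + 4 : Nat) : Int) := by push_cast; ring
        rw [c2, PySem.List.slice_natCast, PySem.List.slice_natCast,
            (by omega : n + 4 - (n + 2) = 2), (by omega : n + 2 - n = 2)]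
        have hd : List.drop (n + 2) (a :: b :: r) = List.drop n r := by
          rw [show n + 2 = n + 1 + 1 from rfl]
          simp [List.drop_succ_cons]
        rw [hd]

-- the reversed swapped string is the reversed chunk list (with the odd leftover in front)
theorem pvSwapRev_eq (cs : List Char) :
    (pvSwapSpec cs).reverse
    = (if (cs.length % 2 ≠ 0) then [PySem.List.pyGetD cs (-1) ' '] else []) ++ (pvChunks cs).reverse.flatten := by
  induction cs using pvSwapSpec.induct with
  | case3 => simp [pvSwapSpec, pvChunks]
  | case2 a =>
      simp [pvSwapSpec, pvChunks]
      rw [PySem.List.pyGetD_neg_one _ _ (by simp)]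
      simp
  | case1 a b r ih =>
      have hlen : (a :: b :: r).length % 2 = r.length % 2 := by simp; omega
      simp only [pvSwapSpec, pvChunks, List.reverse_cons, List.reverse_cons, hlen]
      rw [ih]
      by_cases hr : r.length % 2 = 0
      · simp [hr]
      · have hne : r ≠ [] := by intro h; subst h; simp at hr
        have hget : PySem.List.pyGetD (a :: b :: r) (-1) ' ' = PySem.List.pyGetD r (-1) ' ' := by
          rw [PySem.List.pyGetD_neg_one _ _ (by simp), PySem.List.pyGetD_neg_one _ _ hne]
          simp [List.getLast_cons, hne]
        simp [hr, hget]

-- ===== VERDICT (by name: the statement is the Claim_ definition above) =====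
theorem generate_reversed_swapped_sentence_spec : Claim_equal_generate_reversed_swapped_sentence := by
  intro s _
  unfold Spec_generate_reversed_swapped_sentence
  simp only [generate_reversed_swapped_sentence, generate_reversed_swapped_sentence_alt]
  rw [pvLoopA_eq s.toList [] _ (PySem.Str.len_eq s),
      pvChunksB_eq s.toList _ (PySem.Str.len_eq s),
      List.nil_append, pvSwapRev_eq s.toList]
  have hm : PySem.Int.mod (PySem.Str.len s) 2 = ((s.toList.length % 2 : Nat) : Int) := by
    rw [PySem.Str.len_eq]
    simp only [PySem.Int.mod]
    rw [Int.fmod_eq_emod, if_pos (Or.inl (by norm_num))]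
    push_cast
    ring
  congr 1
  by_cases h : s.toList.length % 2 = 0
  · rw [if_neg (not_not_intro h), if_neg (by rw [hm]; push_cast; omega), List.nil_append]
  · rw [if_pos h, if_pos (by rw [hm]; push_cast; omega)]
    rfl
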